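-- pv_equiv track=rewrite | github.com/GundalaNikhil/DSA | dsa-problems/Hashing/testcases/tc_generator/generate_hashing_testcases.py | substring_equal_hash
-- ===== SOURCE A (Python) =====
-- def substring_equal_hash(s, queries, B=911382323, M=1000000007):
--     """Helper for HSH-002: Check if substrings are equal using hash"""
--     n = len(s)
--     # Compute prefix hashes
--     prefix = [0] * (n + 1)
--     for i in range(n):
--         prefix[i + 1] = (prefix[i] * B + ord(s[i])) % M
--
--     # Compute powers of B
--     pow_B = [1] * (n + 1)
--     for i in range(1, n + 1):
--         pow_B[i] = (pow_B[i - 1] * B) % M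
--
--     results = []
--     for l1, r1, l2, r2 in queries:
--         # Hash of s[l1..r1]
--         len1 = r1 - l1 + 1
--         hash1 = (prefix[r1 + 1] - prefix[l1] * pow_B[len1]) % M
--
--         # Hash of s[l2..r2]
--         len2 = r2 - l2 + 1
--         hash2 = (prefix[r2 + 1] - prefix[l2] * pow_B[len2]) % M
--
--         results.append("YES" if hash1 == hash2 else "NO")
--     return results
-- ===== SOURCE B (Python) =====
-- def substring_equal_hash(s, queries, B=911382323, M=1000000007):
--     """Helper for HSH-002: Check if substrings are equal using hash"""
--     results = []
--     for l1, r1, l2, r2 in queries: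
--         h1 = 0
--         for i in range(l1, r1 + 1):
--             h1 = (h1 * B + ord(s[i])) % M
--         h2 = 0
--         for i in range(l2, r2 + 1):
--             h2 = (h2 * B + ord(s[i])) % M
--         results.append("YES" if h1 == h2 else "NO")
--     return results
-- ===== Notes on version B (the rewrite author's own statement) =====
-- stated objective: alternative
-- what changed: Drops A's prefix-hash and power-of-B preprocessing tables entirely: each query's two polynomial hashes are recomputed directly by a character loop h=(h*B+ord(s[i]))%M, reproducing the identical hash values (and collisions) without any table or the prefix subtraction formula.
-- outside the precondition, e.g. on substring_equal_hash('abc', [(-3, -3, -2, -3)], 10, 97): A returns ['NO'], B returns ['YES']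
import Mathlib
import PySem

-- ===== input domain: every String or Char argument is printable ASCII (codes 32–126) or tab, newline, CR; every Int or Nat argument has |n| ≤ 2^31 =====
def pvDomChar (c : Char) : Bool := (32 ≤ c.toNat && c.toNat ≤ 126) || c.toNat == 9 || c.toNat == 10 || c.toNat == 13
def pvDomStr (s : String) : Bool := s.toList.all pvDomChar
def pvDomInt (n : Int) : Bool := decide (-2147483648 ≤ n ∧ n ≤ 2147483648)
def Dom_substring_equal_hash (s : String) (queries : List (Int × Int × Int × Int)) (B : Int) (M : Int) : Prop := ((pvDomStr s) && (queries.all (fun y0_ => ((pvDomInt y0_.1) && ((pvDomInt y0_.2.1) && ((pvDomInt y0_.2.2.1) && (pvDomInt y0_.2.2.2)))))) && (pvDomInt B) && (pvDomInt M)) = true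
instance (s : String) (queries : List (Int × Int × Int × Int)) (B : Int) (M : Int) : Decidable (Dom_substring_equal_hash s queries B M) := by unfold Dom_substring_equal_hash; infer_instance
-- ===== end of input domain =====

-- B drops A's prefix-hash/power tables and recomputes each query's two polynomial hashes by a direct character loop (alternative decomposition, same hash values and collisions; not faster).


-- ===== PORT A =====
-- the loop 'for i in range(n): prefix[i+1] = (prefix[i]*B + ord(s[i])) % M', state = current last entry
def pvBuildPrefix (cs : List Char) (h B M : Int) : List Int :=
  match cs with
  | [] => []
  | c :: t =>
      let h' := PySem.Int.mod (h * B + (c.toNat : Int)) M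
      h' :: pvBuildPrefix t h' B M

-- the loop 'for i in range(1, n+1): pow_B[i] = (pow_B[i-1]*B) % M', state = current last entry
def pvBuildPow (k : Nat) (p B M : Int) : List Int :=
  match k with
  | 0 => []
  | k + 1 =>
      let p' := PySem.Int.mod (p * B) M
      p' :: pvBuildPow k p' B M

-- one iteration of A's query loop (prefix-difference formula)
def pvAnsA (pre pw : List Int) (M : Int) (q : Int × Int × Int × Int) : String :=
  let len1 := q.2.1 - q.1 + 1
  let hash1 := PySem.Int.mod ((PySem.List.pyGet? pre (q.2.1 + 1)).getD 0 -
                 (PySem.List.pyGet? pre q.1).getD 0 * (PySem.List.pyGet? pw len1).getD 0) M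
  let len2 := q.2.2.2 - q.2.2.1 + 1
  let hash2 := PySem.Int.mod ((PySem.List.pyGet? pre (q.2.2.2 + 1)).getD 0 -
                 (PySem.List.pyGet? pre q.2.2.1).getD 0 * (PySem.List.pyGet? pw len2).getD 0) M
  if hash1 = hash2 then "YES" else "NO"

def substring_equal_hash (s : String) (queries : List (Int × Int × Int × Int)) (B : Int) (M : Int) : List String :=
  let cs := s.toList
  let pre := 0 :: pvBuildPrefix cs 0 B M
  let pw := 1 :: pvBuildPow cs.length 1 B M
  queries.foldl (fun res q => res ++ [pvAnsA pre pw M q]) []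

-- ===== PORT B =====
-- 'h = 0; for i in range(l, r+1): h = (h*B + ord(s[i])) % M'
def pvHashSub (cs : List Char) (l r B M : Int) : Int :=
  (PySem.List.pyRange l (r + 1) 1).foldl
    (fun h i => PySem.Int.mod (h * B + ((PySem.List.pyGetD cs i ' ').toNat : Int)) M) 0

def pvAnsB (cs : List Char) (B M : Int) (q : Int × Int × Int × Int) : String :=
  let h1 := pvHashSub cs q.1 q.2.1 B M
  let h2 := pvHashSub cs q.2.2.1 q.2.2.2 B M
  if h1 = h2 then "YES" else "NO"

def substring_equal_hash_alt (s : String) (queries : List (Int × Int × Int × Int)) (B : Int) (M : Int) : List String :=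
  queries.foldl (fun res q => res ++ [pvAnsB s.toList B M q]) []

-- ===== PRECONDITION & SPEC =====
-- Pre_ keeps the natural query domain 0 ≤ l ≤ r+1 ≤ len(s) (empty substrings allowed) and M ≠ 0: outside it
-- A raises (ZeroDivisionError for M = 0, IndexError for far-out indices) or, for negative/reversed indices that
-- happen to stay in wrap range, reads its tables through Python negative-index wraparound — malformed queries
-- no caller would rely on, which B's direct scan resolves differently.
def Pre_substring_equal_hash (s : String) (queries : List (Int × Int × Int × Int)) (B : Int) (M : Int) : Prop :=
  M ≠ 0 ∧ ∀ q ∈ queries,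
    (0 ≤ q.1 ∧ q.1 ≤ q.2.1 + 1 ∧ q.2.1 + 1 ≤ (s.toList.length : Int)) ∧
    (0 ≤ q.2.2.1 ∧ q.2.2.1 ≤ q.2.2.2 + 1 ∧ q.2.2.2 + 1 ≤ (s.toList.length : Int))
instance (s : String) (queries : List (Int × Int × Int × Int)) (B : Int) (M : Int) : Decidable (Pre_substring_equal_hash s queries B M) := by unfold Pre_substring_equal_hash; infer_instance

def pvWitness_substring_equal_hash : String × (List (Int × Int × Int × Int)) × Int × Int :=
  ("abab", [(0, 1, 2, 3), (0, 0, 1, 1), (1, 0, 0, 3)], 911, 97)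

def Spec_substring_equal_hash (s : String) (queries : List (Int × Int × Int × Int)) (B : Int) (M : Int) (out : List String) : Prop := out = substring_equal_hash_alt s queries B M
instance (s : String) (queries : List (Int × Int × Int × Int)) (B : Int) (M : Int) (out : List String) : Decidable (Spec_substring_equal_hash s queries B M out) := by unfold Spec_substring_equal_hash; infer_instance

-- ===== CLAIM (what is proved, stated in full; the proofs are below) =====
def Claim_equal_substring_equal_hash : Prop := ∀ (s : String) (queries : List (Int × Int × Int × Int)) (B : Int) (M : Int), Dom_substring_equal_hash s queries B M → Pre_substring_equal_hash s queries B M → Spec_substring_equal_hash s queries B M (substring_equal_hash s queries B M)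

-- ===== LEMMAS AND PROOFS =====

-- the common hashing step and its fold
def pvStep (B M h : Int) (c : Char) : Int := PySem.Int.mod (h * B + (c.toNat : Int)) M
def pvH (B M : Int) (u : List Char) (h0 : Int) : Int := u.foldl (pvStep B M) h0

-- Python '%' keeps the residue class
lemma pvMod_modeq (a M : Int) : PySem.Int.mod a M ≡ a [ZMOD M] := by
  rw [Int.modEq_iff_dvd]
  exact ⟨PySem.Int.floordiv a M, by
    have := PySem.Int.floordiv_mul_add_mod a M
    linarith [this]⟩

-- Python '%' is determined by the residue class (M ≠ 0)
lemma pvMod_eq_of_modeq {a b M : Int} (hM : M ≠ 0) (h : a ≡ b [ZMOD M]) :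
    PySem.Int.mod a M = PySem.Int.mod b M := by
  rcases lt_or_gt_of_ne hM with hneg | hpos
  · have h1 := PySem.Int.mod_neg_bounds a hneg
    have h2 := PySem.Int.mod_neg_bounds b hneg
    have hcong : PySem.Int.mod a M ≡ PySem.Int.mod b M [ZMOD M] :=
      ((pvMod_modeq a M).trans h).trans (pvMod_modeq b M).symm
    rw [Int.modEq_iff_dvd] at hcong
    obtain ⟨c, hc⟩ := hcong
    have hlt : M < M * c := by omega
    have hlt2 : M * c < -M := by omega
    rcases lt_trichotomy c 0 with hcc | hcc | hcc
    · exfalso; nlinarith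
    · rw [hcc, mul_zero] at hc; omega
    · exfalso; nlinarith
  · rw [PySem.Int.mod_eq_emod_of_pos hpos, PySem.Int.mod_eq_emod_of_pos hpos]
    exact h

lemma pvMod_mod {M : Int} (hM : M ≠ 0) (a : Int) :
    PySem.Int.mod (PySem.Int.mod a M) M = PySem.Int.mod a M :=
  pvMod_eq_of_modeq hM (pvMod_modeq a M)

-- folding from h0 = shift by B^len plus folding from 0
lemma pvH_shift (B M : Int) (u : List Char) (h0 : Int) :
    pvH B M u h0 ≡ h0 * B ^ u.length + pvH B M u 0 [ZMOD M] := by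
  induction u using List.reverseRecOn with
  | nil => simp [pvH]
  | append_singleton u c ih =>
      have e1 : ∀ h : Int, pvH B M (u ++ [c]) h = PySem.Int.mod (pvH B M u h * B + (c.toNat : Int)) M := by
        intro h; simp [pvH, List.foldl_append, pvStep]
      rw [e1, e1, List.length_append, List.length_cons, List.length_nil]
      calc PySem.Int.mod (pvH B M u h0 * B + (c.toNat : Int)) M
          ≡ pvH B M u h0 * B + (c.toNat : Int) [ZMOD M] := pvMod_modeq _ M
        _ ≡ (h0 * B ^ u.length + pvH B M u 0) * B + (c.toNat : Int) [ZMOD M] :=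
            (ih.mul_right B).add_right _
        _ = h0 * B ^ (u.length + 1) + (pvH B M u 0 * B + (c.toNat : Int)) := by ring
        _ ≡ h0 * B ^ (u.length + 1) + PySem.Int.mod (pvH B M u 0 * B + (c.toNat : Int)) M [ZMOD M] :=
            Int.ModEq.add_left _ (pvMod_modeq _ M).symm

-- pvH values are '%'-reduced
lemma pvH_reduced (B M : Int) (hM : M ≠ 0) (u : List Char) :
    PySem.Int.mod (pvH B M u 0) M = pvH B M u 0 := by
  induction u using List.reverseRecOn with
  | nil => simp [pvH, PySem.Int.mod]
  | append_singleton u c ih => simp [pvH, List.foldl_append, pvStep, pvMod_mod hM]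

-- entries of A's prefix table
lemma pvBuildPrefix_get (B M : Int) : ∀ (t : List Char) (h : Int) (j : Nat), j < t.length →
    (pvBuildPrefix t h B M)[j]? = some (pvH B M (t.take (j + 1)) h) := by
  intro t
  induction t with
  | nil => intro h j hj; simp at hj
  | cons c t ih =>
      intro h j hj
      cases j with
      | zero => simp [pvBuildPrefix, pvH, pvStep]
      | succ j =>
          simp only [pvBuildPrefix, List.getElem?_cons_succ, List.length_cons] at *
          rw [ih _ j (by omega)]
          simp [pvH, pvStep]

-- entries of A's power table are ≡ B^(index+1)
lemma pvBuildPow_get (B M : Int) : ∀ (k : Nat) (p : Int) (j : Nat), j < k →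
    ∃ v, (pvBuildPow k p B M)[j]? = some v ∧ v ≡ p * B ^ (j + 1) [ZMOD M] := by
  intro k
  induction k with
  | zero => intro p j hj; omega
  | succ k ih =>
      intro p j hj
      cases j with
      | zero =>
          exact ⟨_, rfl, by simpa using pvMod_modeq (p * B) M⟩
      | succ j =>
          obtain ⟨v, hv, hcong⟩ := ih (PySem.Int.mod (p * B) M) j (by omega)
          refine ⟨v, by simpa [pvBuildPow] using hv, ?_⟩
          calc v ≡ PySem.Int.mod (p * B) M * B ^ (j + 1) [ZMOD M] := hcong
            _ ≡ p * B * B ^ (j + 1) [ZMOD M] := (pvMod_modeq (p * B) M).mul_right _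
            _ = p * B ^ (j + 1 + 1) := by ring

-- B's per-query loop is pvH over the substring slice
lemma pvHashSub_eq (cs : List Char) (l r B M : Int)
    (h0 : 0 ≤ l) (h1 : l ≤ r + 1) (h2 : r + 1 ≤ (cs.length : Int)) :
    pvHashSub cs l r B M = pvH B M ((cs.take (r + 1).toNat).drop l.toNat) 0 := by
  have hmlen : ((cs.take (r + 1).toNat).length : Int) = r + 1 := by
    simp [List.length_take]; omega
  unfold pvHashSub
  have step1 : (PySem.List.pyRange l (r + 1) 1).foldl
      (fun h i => PySem.Int.mod (h * B + ((PySem.List.pyGetD cs i ' ').toNat : Int)) M) 0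
      = (PySem.List.pyRange l (r + 1) 1).foldl
      (fun h i => PySem.Int.mod (h * B + ((PySem.List.pyGetD (cs.take (r + 1).toNat) i ' ').toNat : Int)) M) 0 := by
    apply PySem.List.foldl_congr_mem
    intro acc i hi
    rw [PySem.List.mem_pyRange_one] at hi
    have hi0 : (0 : Int) ≤ i := by omega
    rw [PySem.List.pyGetD_of_nonneg _ _ hi0, PySem.List.pyGetD_of_nonneg _ _ hi0]
    have hlt : i.toNat < (r + 1).toNat := by omega
    rw [List.getD_eq_getElem?_getD, List.getD_eq_getElem?_getD,
        List.getElem?_take_of_lt hlt]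
  rw [step1]
  have step2 : PySem.List.pyRange l (r + 1) 1
      = PySem.List.pyRange l ((cs.take (r + 1).toNat).length : Int) 1 := by rw [hmlen]
  rw [step2]
  exact PySem.List.foldl_pyRange_pyGetD' (cs.take (r + 1).toNat) ' '
    (fun h c => PySem.Int.mod (h * B + (c.toNat : Int)) M) 0 h0

-- A's prefix-table lookup is the hash of a prefix of the string
lemma pvPreGet (cs : List Char) (B M i : Int) (hi0 : 0 ≤ i) (hi1 : i ≤ (cs.length : Int)) :
    (PySem.List.pyGet? (0 :: pvBuildPrefix cs 0 B M) i).getD 0 = pvH B M (cs.take i.toNat) 0 := by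
  rw [PySem.List.pyGet?_of_nonneg _ hi0]
  cases hn : i.toNat with
  | zero => simp [pvH]
  | succ j =>
      have hj : j < cs.length := by omega
      rw [List.getElem?_cons_succ, pvBuildPrefix_get B M cs 0 j hj]
      rfl

-- A's power-table lookup is ≡ B^index
lemma pvPowGet (cs : List Char) (B M k : Int) (hk0 : 0 ≤ k) (hk1 : k ≤ (cs.length : Int)) :
    (PySem.List.pyGet? (1 :: pvBuildPow cs.length 1 B M) k).getD 0 ≡ B ^ k.toNat [ZMOD M] := by
  rw [PySem.List.pyGet?_of_nonneg _ hk0]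
  cases hn : k.toNat with
  | zero => simp
  | succ j =>
      have hj : j < cs.length := by omega
      obtain ⟨v, hv, hc⟩ := pvBuildPow_get B M cs.length 1 j hj
      rw [List.getElem?_cons_succ, hv]
      simpa using hc

-- A's prefix-difference formula computes the direct hash of the substring
lemma pvHashA_eq (cs : List Char) (B M : Int) (hM : M ≠ 0) (l r : Int)
    (h0 : 0 ≤ l) (h1 : l ≤ r + 1) (h2 : r + 1 ≤ (cs.length : Int)) :
    PySem.Int.mod ((PySem.List.pyGet? (0 :: pvBuildPrefix cs 0 B M) (r + 1)).getD 0 -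
        (PySem.List.pyGet? (0 :: pvBuildPrefix cs 0 B M) l).getD 0 *
        (PySem.List.pyGet? (1 :: pvBuildPow cs.length 1 B M) (r - l + 1)).getD 0) M
      = pvH B M ((cs.take (r + 1).toNat).drop l.toNat) 0 := by
  set sub := (cs.take (r + 1).toNat).drop l.toNat with hsub
  have hPr := pvPreGet cs B M (r + 1) (by omega) (by omega)
  have hPl := pvPreGet cs B M l h0 (by omega)
  have hpw := pvPowGet cs B M (r - l + 1) (by omega) (by omega)
  have htake : (cs.take (r + 1).toNat).take l.toNat = cs.take l.toNat := by
    rw [List.take_take]; congr 1; omega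
  have hcat : cs.take l.toNat ++ sub = cs.take (r + 1).toNat := by
    rw [← htake, hsub]; exact List.take_append_drop _ _
  have hsplit : pvH B M (cs.take (r + 1).toNat) 0
      = pvH B M sub (pvH B M (cs.take l.toNat) 0) := by
    rw [← hcat]; simp [pvH, List.foldl_append]
  have hlen : sub.length = (r - l + 1).toNat := by
    simp only [hsub, List.length_drop, List.length_take]; omega
  have hshift := pvH_shift B M sub (pvH B M (cs.take l.toNat) 0)
  have hX : (PySem.List.pyGet? (0 :: pvBuildPrefix cs 0 B M) (r + 1)).getD 0 -
      (PySem.List.pyGet? (0 :: pvBuildPrefix cs 0 B M) l).getD 0 *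
      (PySem.List.pyGet? (1 :: pvBuildPow cs.length 1 B M) (r - l + 1)).getD 0
      ≡ pvH B M sub 0 [ZMOD M] := by
    rw [hPr, hPl, hsplit]
    calc pvH B M sub (pvH B M (cs.take l.toNat) 0) -
          pvH B M (cs.take l.toNat) 0 *
            (PySem.List.pyGet? (1 :: pvBuildPow cs.length 1 B M) (r - l + 1)).getD 0
        ≡ (pvH B M (cs.take l.toNat) 0 * B ^ sub.length + pvH B M sub 0) -
            pvH B M (cs.take l.toNat) 0 * B ^ (r - l + 1).toNat [ZMOD M] :=
          hshift.sub (hpw.mul_left _)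
      _ = pvH B M sub 0 := by rw [hlen]; ring
  calc PySem.Int.mod _ M = PySem.Int.mod (pvH B M sub 0) M := pvMod_eq_of_modeq hM hX
    _ = pvH B M sub 0 := pvH_reduced B M hM sub

-- the per-query agreement
lemma pvAns_eq (cs : List Char) (B M : Int) (hM : M ≠ 0) (q : Int × Int × Int × Int)
    (hq : (0 ≤ q.1 ∧ q.1 ≤ q.2.1 + 1 ∧ q.2.1 + 1 ≤ (cs.length : Int)) ∧
          (0 ≤ q.2.2.1 ∧ q.2.2.1 ≤ q.2.2.2 + 1 ∧ q.2.2.2 + 1 ≤ (cs.length : Int))) :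
    pvAnsA (0 :: pvBuildPrefix cs 0 B M) (1 :: pvBuildPow cs.length 1 B M) M q
      = pvAnsB cs B M q := by
  obtain ⟨⟨a1, a2, a3⟩, b1, b2, b3⟩ := hq
  simp only [pvAnsA, pvAnsB]
  rw [pvHashA_eq cs B M hM q.1 q.2.1 a1 a2 a3,
      pvHashA_eq cs B M hM q.2.2.1 q.2.2.2 b1 b2 b3,
      pvHashSub_eq cs q.1 q.2.1 B M a1 a2 a3,
      pvHashSub_eq cs q.2.2.1 q.2.2.2 B M b1 b2 b3]

-- ===== VERDICT (by name: the statement is the Claim_ definition above) =====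
theorem substring_equal_hash_spec : Claim_equal_substring_equal_hash := by
  intro s queries B M _ hpre
  unfold Spec_substring_equal_hash substring_equal_hash substring_equal_hash_alt
  rw [PySem.List.foldl_append_singleton_eq_map, PySem.List.foldl_append_singleton_eq_map]
  simp only [List.nil_append]
  exact List.map_congr_left fun q hq => pvAns_eq s.toList B M hpre.1 q (hpre.2 q hq)
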